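-- pv_equiv track=rewrite | github.com/pieteradejong/Google-Drive-Manager | backend/analytics.py | compute_large_lists
-- ===== SOURCE A (Python) =====
-- from typing import Any, Dict, List, Optional, Tuple
--
-- def _safe_int(value: Any, default: int = 0) -> int:
--     try:
--         if value is None:
--             return default
--         return int(value)
--     except Exception:
--         return default
--
-- def _is_folder(file_obj: Dict[str, Any]) -> bool:
--     return file_obj.get("mimeType") == "application/vnd.google-apps.folder"
--
-- def _file_size(file_obj: Dict[str, Any]) -> int:
--     # Prefer calculatedSize for folders; fall back to size.
--     return _safe_int(file_obj.get("calculatedSize") or file_obj.get("size") or 0)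
--
-- def compute_large_lists(files: List[Dict[str, Any]]) -> Dict[str, Any]:
--     """Precompute top-N largest files/folders by size."""
--     folders = [f for f in files if _is_folder(f) and f.get("id")]
--     nonfolders = [f for f in files if (not _is_folder(f)) and f.get("id")]
--
--     # Sorting once on backend is okay; keep top lists bounded.
--     nonfolders.sort(key=lambda x: _file_size(x), reverse=True)
--     folders.sort(key=lambda x: _file_size(x), reverse=True)
--
--     top_files = [f["id"] for f in nonfolders[:2000]]
--     top_folders = [f["id"] for f in folders[:1000]]
--     return {"top_file_ids": top_files, "top_folder_ids": top_folders}
-- ===== SOURCE B (Python) =====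
-- from typing import Any, Dict, List
--
-- def _safe_int(value: Any, default: int = 0) -> int:
--     try:
--         if value is None:
--             return default
--         return int(value)
--     except Exception:
--         return default
--
-- def _is_folder(file_obj: Dict[str, Any]) -> bool:
--     return file_obj.get("mimeType") == "application/vnd.google-apps.folder"
--
-- def _file_size(file_obj: Dict[str, Any]) -> int:
--     return _safe_int(file_obj.get("calculatedSize") or file_obj.get("size") or 0)
--
-- def compute_large_lists(files: List[Dict[str, Any]]) -> Dict[str, Any]:
--     """Precompute top-N largest files/folders by size: one sort, one partitioning pass."""
--     with_id = [f for f in files if f.get("id")]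
--     with_id.sort(key=_file_size, reverse=True)
--     folder_ids: List[str] = []
--     file_ids: List[str] = []
--     for f in with_id:
--         (folder_ids if _is_folder(f) else file_ids).append(f["id"])
--     return {"top_file_ids": file_ids[:2000], "top_folder_ids": folder_ids[:1000]}
-- ===== Notes on version B (the rewrite author's own statement) =====
-- stated objective: alternative
-- what changed: B filters once on a truthy id, sorts that whole list once (stable, reverse) by size, and splits ids into folder/non-folder lists in a single partitioning pass, instead of A's two separate filter-then-sort passes; ties keep input order because the single stable sort filtered equals the filtered stable sorts.
import Mathlib
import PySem

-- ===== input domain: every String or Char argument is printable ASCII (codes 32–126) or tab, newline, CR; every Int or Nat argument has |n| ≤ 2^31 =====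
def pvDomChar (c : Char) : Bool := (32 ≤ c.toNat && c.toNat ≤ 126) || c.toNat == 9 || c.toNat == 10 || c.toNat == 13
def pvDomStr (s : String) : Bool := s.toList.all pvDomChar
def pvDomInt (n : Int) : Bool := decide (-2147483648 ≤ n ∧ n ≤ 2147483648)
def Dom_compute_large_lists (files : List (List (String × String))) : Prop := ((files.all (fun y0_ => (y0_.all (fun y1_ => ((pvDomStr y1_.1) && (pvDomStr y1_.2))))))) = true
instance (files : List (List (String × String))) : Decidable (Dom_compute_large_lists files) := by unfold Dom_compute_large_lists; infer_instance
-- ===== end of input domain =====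

-- B replaces A's two filter-then-sort passes by one sort of the id-bearing files plus a single
-- partitioning pass (objective: alternative decomposition; same value, ties preserved by stability).

-- ===== PORT A =====
-- shared same-module helpers (_is_folder, _file_size, truthy f.get(k)), used verbatim by both Pythons

-- Python truthiness of f.get(k): None and "" are falsy
def pvTruthyGet (f : List (String × String)) (k : String) : Option String :=
  match (PySem.Dict.mk f).get? k with
  | some s => if s = "" then none else some s
  | none => none

-- _is_folder
def pvIsFolder (f : List (String × String)) : Bool :=
  (PySem.Dict.mk f).get? "mimeType" == some "application/vnd.google-apps.folder"

-- f.get("id") truthy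
def pvHasId (f : List (String × String)) : Bool :=
  (pvTruthyGet f "id").isSome

-- _file_size: _safe_int(f.get("calculatedSize") or f.get("size") or 0); int(s) with ValueError → 0
def pvFileSize (f : List (String × String)) : Int :=
  match (pvTruthyGet f "calculatedSize").or (pvTruthyGet f "size") with
  | some s => (PySem.Int.ofStr? s).getD 0
  | none => 0

-- f["id"]; exact here: every caller filters on pvHasId first, so "id" is present (no KeyError)
def pvGetId (f : List (String × String)) : String :=
  ((PySem.Dict.mk f).get? "id").getD ""

def compute_large_lists (files : List (List (String × String))) : List (String × List String) :=
  let folders := files.filter (fun f => pvIsFolder f && pvHasId f)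
  let nonfolders := files.filter (fun f => !pvIsFolder f && pvHasId f)
  let nonfolders := PySem.List.sorted nonfolders pvFileSize true
  let folders := PySem.List.sorted folders pvFileSize true
  let top_files := (PySem.List.slice nonfolders none (some 2000)).map (fun f => pvGetId f)
  let top_folders := (PySem.List.slice folders none (some 1000)).map (fun f => pvGetId f)
  [("top_file_ids", top_files), ("top_folder_ids", top_folders)]

-- ===== PORT B =====
def compute_large_lists_alt (files : List (List (String × String))) : List (String × List String) :=
  let with_id := files.filter (fun f => pvHasId f)
  let with_id := PySem.List.sorted with_id pvFileSize true
  let ids := with_id.foldl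
    (fun (acc : List String × List String) f =>
      if pvIsFolder f then (acc.1 ++ [pvGetId f], acc.2) else (acc.1, acc.2 ++ [pvGetId f]))
    ([], [])
  [("top_file_ids", PySem.List.slice ids.2 none (some 2000)),
   ("top_folder_ids", PySem.List.slice ids.1 none (some 1000))]

-- ===== PRECONDITION & SPEC =====
def Spec_compute_large_lists (files : List (List (String × String))) (out : List (String × List String)) : Prop := out = compute_large_lists_alt files
instance (files : List (List (String × String))) (out : List (String × List String)) : Decidable (Spec_compute_large_lists files out) := by unfold Spec_compute_large_lists; infer_instance

-- ===== CLAIM (what is proved, stated in full; the proofs are below) =====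
def Claim_equal_compute_large_lists : Prop := ∀ (files : List (List (String × String))), Dom_compute_large_lists files → Spec_compute_large_lists files (compute_large_lists files)

-- ===== LEMMAS AND PROOFS =====

-- filtering commutes with one insertion step of the reverse-stable insertion sort,
-- provided the target list is already in (weakly) decreasing key order
theorem pv_filter_insertBy {α : Type} (key : α → Int) (p : α → Bool) (x : α) (ys : List α)
    (h : ys.Pairwise (fun a b => key b ≤ key a)) :
    (PySem.List.insertBy (fun a b => decide (key b < key a)) x ys).filter p =
      if p x then PySem.List.insertBy (fun a b => decide (key b < key a)) x (ys.filter p)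
      else ys.filter p := by
  induction ys with
  | nil => cases hp : p x <;> simp [PySem.List.insertBy, List.filter, hp]
  | cons y ys ih =>
    rcases List.pairwise_cons.mp h with ⟨hy, h'⟩
    by_cases hlt : key y < key x
    · -- x goes in front of y, hence in front of every kept element
      have hhead : ∀ (zs : List α), (∀ z ∈ zs, key z ≤ key y) →
          PySem.List.insertBy (fun a b => decide (key b < key a)) x zs =
            if zs = [] then [x] else x :: zs := by
        intro zs hz
        cases zs with
        | nil => simp [PySem.List.insertBy]
        | cons z zt =>
          have : key z < key x := lt_of_le_of_lt (hz z (by simp)) hlt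
          simp [PySem.List.insertBy, this]
      simp only [PySem.List.insertBy, hlt, decide_true, if_true]
      by_cases hp : p x
      · have hsub : ∀ z ∈ (y :: ys).filter p, key z ≤ key y := by
          intro z hz
          have hz' := List.mem_of_mem_filter hz
          rcases List.mem_cons.mp hz' with h1 | h1
          · exact le_of_eq (by rw [h1])
          · exact hy z h1
        rw [hhead _ hsub]
        cases hfe : (y :: ys).filter p with
        | nil => simp [hp, hfe]
        | cons z zt => simp [hp, hfe]
      · simp [hp, List.filter_cons]
    · -- x is inserted further right, past y
      have hd : (decide (key y < key x)) = false := by simp [hlt]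
      simp only [PySem.List.insertBy, hd, Bool.false_eq_true, if_false]
      by_cases hp : p y
      · simp only [List.filter_cons, hp, if_true, ih h', PySem.List.insertBy, hd,
          Bool.false_eq_true, if_false]
        split_ifs <;> rfl
      · simp [hp, ih h']

-- filtering commutes with the whole reverse stable sort
theorem pv_filter_sorted_rev {α : Type} (key : α → Int) (p : α → Bool) (xs : List α) :
    (PySem.List.sorted xs key true).filter p = PySem.List.sorted (xs.filter p) key true := by
  induction xs using List.reverseRecOn with
  | nil => simp [PySem.List.sorted]
  | append_singleton xs x ih =>
    rw [PySem.List.sorted_rev_eq_foldl_insertBy, List.foldl_append,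
        ← PySem.List.sorted_rev_eq_foldl_insertBy]
    simp only [List.foldl_cons, List.foldl_nil]
    rw [pv_filter_insertBy key p x _ (PySem.List.sorted_pairwise_rev xs key), ih]
    rw [List.filter_append]
    by_cases hx : p x
    · simp only [List.filter_cons, hx, if_true, List.filter_nil]
      rw [PySem.List.sorted_rev_eq_foldl_insertBy (xs.filter p ++ [x]), List.foldl_append,
          ← PySem.List.sorted_rev_eq_foldl_insertBy]
      simp
    · simp [hx]

-- B's single partitioning pass, characterised
theorem pv_partition_foldl (s : List (List (String × String)))
    (a b : List String) :
    s.foldl (fun (acc : List String × List String) f =>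
        if pvIsFolder f then (acc.1 ++ [pvGetId f], acc.2) else (acc.1, acc.2 ++ [pvGetId f]))
      (a, b) =
      (a ++ (s.filter (fun f => pvIsFolder f)).map pvGetId,
       b ++ (s.filter (fun f => !pvIsFolder f)).map pvGetId) := by
  induction s generalizing a b with
  | nil => simp
  | cons f s ih =>
    by_cases hf : pvIsFolder f
    · simp [List.foldl_cons, hf, ih]
    · simp [List.foldl_cons, hf, ih]

-- ===== VERDICT (by name: the statement is the Claim_ definition above) =====
theorem compute_large_lists_spec : Claim_equal_compute_large_lists := by
  intro files _
  show compute_large_lists files = compute_large_lists_alt files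
  unfold compute_large_lists compute_large_lists_alt
  dsimp only
  rw [pv_partition_foldl _ [] []]
  simp only [List.nil_append]
  rw [pv_filter_sorted_rev pvFileSize (fun f => pvIsFolder f),
      pv_filter_sorted_rev pvFileSize (fun f => !pvIsFolder f),
      List.filter_filter, List.filter_filter]
  have h2000 : (0:Int) ≤ 2000 := by norm_num
  have h1000 : (0:Int) ≤ 1000 := by norm_num
  rw [PySem.List.slice_to _ h2000, PySem.List.slice_to _ h2000,
      PySem.List.slice_to _ h1000, PySem.List.slice_to _ h1000]
  rw [List.map_take, List.map_take]
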